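-- pv_equiv track=rewrite | github.com/yashu6march/Corpus-abstractive-text-summarization-master | Analyze/analyze.py | extractive_fragment
-- ===== SOURCE A (Python) =====
-- def extractive_fragment(article, summary):
--     F = []
--     i = 0
--     j = 0
--     p = len(article)
--     q = len(summary)
--     while i < q:
--         f = []
--         while j < p:
--             if summary[i] == article[j]:
--                 tmp_i = i
--                 tmp_j = j
--                 while tmp_i < q and tmp_j < p and summary[tmp_i] == article[tmp_j]:
--                     tmp_i += 1
--                     tmp_j += 1
--                 if len(f) < (tmp_i - i):
--                     f = summary[i:tmp_i]
--                 j = tmp_j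
--             else:
--                 j += 1
--         i = i + max(len(f), 1)
--         j = 0
--         F.append(f)
--     return F
-- ===== SOURCE B (Python) =====
-- def extractive_fragment(article, summary):
--     # DP table rows[i][j] = length of longest common prefix of summary[i:] and article[j:]
--     rows = [[0] * (len(article) + 1)]
--     for tok in reversed(summary):
--         below = rows[0]
--         rows.insert(0, [m + 1 if tok == a else 0 for a, m in zip(article, below[1:])] + [0])
--     F = []
--     p = len(article)
--     q = len(summary)
--     i = 0
--     while i < q:
--         row = rows[i]
--         best = 0
--         j = 0
--         while j < p:
--             if row[j] > best:
--                 best = row[j]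
--             j += max(row[j], 1)
--         F.append(summary[i:i + best])
--         i += max(best, 1)
--     return F
-- ===== Notes on version B (the rewrite author's own statement) =====
-- stated objective: alternative
-- what changed: Replaces A's three nested scanning loops (per-position character-by-character rematching) by a precomputed suffix-LCP dynamic-programming table built once in one backward pass, so the greedy scan reads match lengths as O(1) table lookups instead of running an inner matching loop.
import Mathlib
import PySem

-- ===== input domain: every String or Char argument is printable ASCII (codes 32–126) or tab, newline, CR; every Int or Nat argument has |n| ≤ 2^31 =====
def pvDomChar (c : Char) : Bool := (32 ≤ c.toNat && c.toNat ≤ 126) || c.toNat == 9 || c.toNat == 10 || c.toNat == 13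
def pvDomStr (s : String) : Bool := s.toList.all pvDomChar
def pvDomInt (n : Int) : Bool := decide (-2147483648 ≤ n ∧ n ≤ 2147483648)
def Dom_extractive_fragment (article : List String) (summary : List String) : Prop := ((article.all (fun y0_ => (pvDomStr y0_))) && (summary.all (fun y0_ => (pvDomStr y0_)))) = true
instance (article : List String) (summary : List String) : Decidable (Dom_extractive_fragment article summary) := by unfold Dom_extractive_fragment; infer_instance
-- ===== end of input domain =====

-- B replaces A's inner character-by-character rematching loop by a suffix-LCP DP table
-- built once, read during the same greedy scan; equivalence is exact on all inputs.
-- Each while loop is ported as structural recursion on a fuel that is a proven upper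
-- bound on its iteration count (the loop index strictly increases), so the fuel never
-- runs out before the Python loop guard fails.

-- ===== PORT A =====
-- the innermost 'while tmp_i < q and tmp_j < p and summary[tmp_i] == article[tmp_j]' loop;
-- called with fuel = summary.length ≥ the number of iterations (tmp_i strictly increases)
def pvLcp (summary article : List String) : Nat → Nat → Nat → Nat × Nat
  | 0, ti, tj => (ti, tj)
  | fuel + 1, ti, tj =>
    if ti < summary.length ∧ tj < article.length ∧ summary.getD ti "" = article.getD tj "" then
      pvLcp summary article fuel (ti + 1) (tj + 1)
    else (ti, tj)

-- the middle 'while j < p' loop (state f, j); j strictly increases each iteration,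
-- so fuel = article.length + 1 suffices
def pvInner (summary article : List String) (i : Nat) : Nat → List String → Nat → List String
  | 0, f, _ => f
  | fuel + 1, f, j =>
    if j < article.length then
      if summary.getD i "" = article.getD j "" then
        pvInner summary article i fuel
          (if f.length < (pvLcp summary article summary.length i j).1 - i then
              PySem.List.slice summary (some (i : Int))
                (some ((pvLcp summary article summary.length i j).1 : Int))
            else f)
          (pvLcp summary article summary.length i j).2
      else pvInner summary article i fuel f (j + 1)
    else f

-- the outer 'while i < q' loop; i strictly increases, fuel = summary.length + 1 suffices
def pvOuter (summary article : List String) : Nat → List (List String) → Nat → List (List String)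
  | 0, F, _ => F
  | fuel + 1, F, i =>
    if i < summary.length then
      pvOuter summary article fuel
        (F ++ [pvInner summary article i (article.length + 1) [] 0])
        (i + max (pvInner summary article i (article.length + 1) [] 0).length 1)
    else F

def extractive_fragment (article : List String) (summary : List String) : List (List String) :=
  pvOuter summary article (summary.length + 1) [] 0

-- ===== PORT B =====
-- one DP row: [m + 1 if tok == a else 0 for a, m in zip(article, below[1:])] + [0]
def pvMkRow (tok : String) (article : List String) (below : List Nat) : List Nat :=
  ((article.zip below.tail).map (fun am => if tok = am.1 then am.2 + 1 else 0)) ++ [0]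

-- 'rows' built back to front: for tok in reversed(summary): rows.insert(0, …)
def pvRows (article summary : List String) : List (List Nat) :=
  summary.reverse.foldl (fun rows tok => pvMkRow tok article (rows.headD []) :: rows)
    [List.replicate (article.length + 1) 0]

-- the 'while j < p' scan over one row, keeping the running maximum; j strictly
-- increases each iteration, so fuel = p + 1 suffices
def pvScan (row : List Nat) (p : Nat) : Nat → Nat → Nat → Nat
  | 0, best, _ => best
  | fuel + 1, best, j =>
    if j < p then
      pvScan row p fuel (if row.getD j 0 > best then row.getD j 0 else best)
        (j + max (row.getD j 0) 1)
    else best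

-- the outer 'while i < q' loop of B; fuel = summary.length + 1 suffices
def pvOuterB (summary : List String) (rows : List (List Nat)) (p : Nat) :
    Nat → List (List String) → Nat → List (List String)
  | 0, F, _ => F
  | fuel + 1, F, i =>
    if i < summary.length then
      pvOuterB summary rows p fuel
        (F ++ [PySem.List.slice summary (some (i : Int))
          (some ((i + pvScan (rows.getD i []) p (p + 1) 0 0 : Nat) : Int))])
        (i + max (pvScan (rows.getD i []) p (p + 1) 0 0) 1)
    else F

def extractive_fragment_alt (article : List String) (summary : List String) :
    List (List String) :=
  pvOuterB summary (pvRows article summary) article.length (summary.length + 1) [] 0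

-- ===== PRECONDITION & SPEC =====
def Spec_extractive_fragment (article : List String) (summary : List String) (out : List (List String)) : Prop := out = extractive_fragment_alt article summary
instance (article : List String) (summary : List String) (out : List (List String)) : Decidable (Spec_extractive_fragment article summary out) := by unfold Spec_extractive_fragment; infer_instance

-- ===== CLAIM (what is proved, stated in full; the proofs are below) =====
def Claim_equal_extractive_fragment : Prop := ∀ (article : List String) (summary : List String), Dom_extractive_fragment article summary → Spec_extractive_fragment article summary (extractive_fragment article summary)

-- ===== LEMMAS AND PROOFS =====
-- length of the longest common prefix of two token lists
def lcpLen : List String → List String → Nat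
  | x :: xs, y :: ys => if x = y then lcpLen xs ys + 1 else 0
  | _, _ => 0

theorem lcpLen_nil_left (ys : List String) : lcpLen [] ys = 0 := by
  cases ys <;> rfl

theorem lcpLen_nil_right (xs : List String) : lcpLen xs [] = 0 := by
  cases xs <;> rfl

theorem lcpLen_le_left : ∀ (xs ys : List String), lcpLen xs ys ≤ xs.length := by
  intro xs
  induction xs with
  | nil => intro ys; cases ys <;> simp [lcpLen]
  | cons x xs ih =>
    intro ys
    cases ys with
    | nil => simp [lcpLen]
    | cons y ys =>
      by_cases h : x = y <;> simp only [lcpLen, if_pos, h] <;> simp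
      exact ih ys

theorem pvLcp_spec (s a : List String) :
    ∀ (fuel ti tj : Nat), s.length ≤ fuel + ti →
    pvLcp s a fuel ti tj
      = (ti + lcpLen (s.drop ti) (a.drop tj), tj + lcpLen (s.drop ti) (a.drop tj)) := by
  intro fuel
  induction fuel with
  | zero =>
    intro ti tj h
    rw [List.drop_eq_nil_of_le (as := s) (by omega), lcpLen_nil_left]
    simp [pvLcp]
  | succ fuel ih =>
    intro ti tj h
    by_cases hc : ti < s.length ∧ tj < a.length ∧ s.getD ti "" = a.getD tj ""
    · obtain ⟨h1, h2, h3⟩ := hc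
      have hs : s.drop ti = s[ti]'h1 :: s.drop (ti + 1) := (List.getElem_cons_drop ..).symm
      have ha : a.drop tj = a[tj]'h2 :: a.drop (tj + 1) := (List.getElem_cons_drop ..).symm
      have heq : s[ti]'h1 = a[tj]'h2 := by
        rwa [List.getD_eq_getElem s "" h1, List.getD_eq_getElem a "" h2] at h3
      rw [pvLcp, if_pos ⟨h1, h2, h3⟩, ih (ti + 1) (tj + 1) (by omega), hs, ha]
      simp only [lcpLen, if_pos heq, Prod.mk.injEq]
      omega
    · rw [pvLcp, if_neg hc]
      push Not at hc
      have hz : lcpLen (s.drop ti) (a.drop tj) = 0 := by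
        by_cases h1 : ti < s.length
        · by_cases h2 : tj < a.length
          · have hs : s.drop ti = s[ti]'h1 :: s.drop (ti + 1) := (List.getElem_cons_drop ..).symm
            have ha : a.drop tj = a[tj]'h2 :: a.drop (tj + 1) := (List.getElem_cons_drop ..).symm
            have hne : s[ti]'h1 ≠ a[tj]'h2 := by
              have h3 := hc h1 h2
              rwa [List.getD_eq_getElem s "" h1, List.getD_eq_getElem a "" h2] at h3
            rw [hs, ha]
            simp [lcpLen, hne]
          · rw [List.drop_eq_nil_of_le (as := a) (by omega), lcpLen_nil_right]
        · rw [List.drop_eq_nil_of_le (as := s) (by omega), lcpLen_nil_left]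
      simp [hz]

-- canonical recursion computing the same rows as pvRows
def rowsR (article : List String) : List String → List (List Nat)
  | [] => [List.replicate (article.length + 1) 0]
  | t :: s => pvMkRow t article ((rowsR article s).headD []) :: rowsR article s

theorem pvRows_eq_rowsR (a s : List String) : pvRows a s = rowsR a s := by
  unfold pvRows
  rw [List.foldl_reverse]
  induction s with
  | nil => rfl
  | cons t s ih => simp only [List.foldr_cons, ih]; rfl

theorem pvMkRow_len (t : String) (a : List String) (below : List Nat)
    (hb : below.length = a.length + 1) : (pvMkRow t a below).length = a.length + 1 := by
  simp [pvMkRow, List.length_zip, hb]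

theorem rowsR_head_len (a s : List String) :
    ((rowsR a s).headD []).length = a.length + 1 := by
  induction s with
  | nil => simp [rowsR]
  | cons t s ih => simpa only [rowsR, List.headD_cons] using pvMkRow_len t a _ ih

theorem pvMkRow_getD (t : String) (a : List String) (below : List Nat)
    (hb : below.length = a.length + 1) (j : Nat) :
    (pvMkRow t a below).getD j 0 =
      if h : j < a.length then (if t = a[j] then below.getD (j + 1) 0 + 1 else 0) else 0 := by
  have hzip : (a.zip below.tail).length = a.length := by
    simp [List.length_zip, hb]
  have hmap : ((a.zip below.tail).map (fun am => if t = am.1 then am.2 + 1 else 0)).length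
      = a.length := by simp [hzip]
  by_cases h : j < a.length
  · rw [dif_pos h]
    have hlen : j < (pvMkRow t a below).length := by
      simp [pvMkRow, hmap]; omega
    rw [List.getD_eq_getElem _ 0 hlen]
    unfold pvMkRow
    rw [List.getElem_append_left (by omega)]
    rw [List.getElem_map, List.getElem_zip, List.getElem_tail]
    rw [List.getD_eq_getElem below 0 (by omega)]
  · rw [dif_neg h]
    by_cases hj : j = a.length
    · subst hj
      have hlen : a.length < (pvMkRow t a below).length := by
        simp [pvMkRow, hmap]
      rw [List.getD_eq_getElem _ 0 hlen]
      unfold pvMkRow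
      rw [List.getElem_append_right (by omega)]
      simp [hmap]
    · have hlen : (pvMkRow t a below).length ≤ j := by
        simp [pvMkRow, hmap]; omega
      rw [List.getD_eq_getElem?_getD, List.getElem?_eq_none (by simpa using hlen)]
      rfl

theorem rowsR_headD_eq_getD (a s : List String) :
    (rowsR a s).headD [] = (rowsR a s).getD 0 [] := by
  cases s <;> simp [rowsR]

theorem rowsR_getD (a : List String) : ∀ (s : List String) (i j : Nat),
    ((rowsR a s).getD i []).getD j 0 = lcpLen (s.drop i) (a.drop j) := by
  intro s
  induction s with
  | nil =>
    intro i j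
    cases i with
    | zero =>
      simp only [rowsR, List.getD_cons_zero, List.drop_nil, lcpLen_nil_left]
      simp [List.getD_eq_getElem?_getD, List.getElem?_replicate]
      split <;> rfl
    | succ i =>
      simp [rowsR, List.getD, lcpLen_nil_left]
  | cons t s ih =>
    intro i j
    cases i with
    | zero =>
      simp only [rowsR, List.getD_cons_zero, List.drop_zero]
      rw [pvMkRow_getD t a _ (rowsR_head_len a s) j]
      by_cases h : j < a.length
      · rw [dif_pos h]
        have hcons : a.drop j = a[j]'h :: a.drop (j + 1) := (List.getElem_cons_drop ..).symm
        rw [hcons]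
        rw [rowsR_headD_eq_getD]
        have := ih 0 (j + 1)
        simp only [List.drop_zero] at this
        rw [this]
        by_cases ht : t = a[j]'h
        · simp [lcpLen, ht]
        · simp [lcpLen, ht]
      · rw [dif_neg h]
        rw [List.drop_eq_nil_of_le (as := a) (by omega), lcpLen_nil_right]
    | succ i =>
      simp only [rowsR, List.getD_cons_succ, List.drop_succ_cons]
      exact ih i j

theorem pvScan_le (row : List Nat) (p K : Nat) (hrow : ∀ j, row.getD j 0 ≤ K) :
    ∀ (fuel j best : Nat), best ≤ K → pvScan row p fuel best j ≤ K := by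
  intro fuel
  induction fuel with
  | zero => intro j best hb; exact hb
  | succ fuel ih =>
    intro j best hb
    by_cases hj : j < p
    · rw [pvScan, if_pos hj]
      apply ih
      by_cases hm : row.getD j 0 > best
      · rw [if_pos hm]; exact hrow j
      · rw [if_neg hm]; exact hb
    · rw [pvScan, if_neg hj]; exact hb

theorem inner_eq (s a : List String) (i : Nat) (hi : i < s.length) :
    ∀ (fuel j best : Nat), a.length < fuel + j → best ≤ s.length - i →
    pvInner s a i fuel ((s.drop i).take best) j
      = (s.drop i).take (pvScan ((rowsR a s).getD i []) a.length fuel best j) := by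
  intro fuel
  induction fuel with
  | zero => intro j best hn hb; rfl
  | succ fuel ih =>
    intro j best hn hb
    by_cases hj : j < a.length
    · have hm : ((rowsR a s).getD i []).getD j 0 = lcpLen (s.drop i) (a.drop j) :=
        rowsR_getD a s i j
      have hlcp := pvLcp_spec s a s.length i j (by omega)
      have hL_le : lcpLen (s.drop i) (a.drop j) ≤ s.length - i := by
        have := lcpLen_le_left (s.drop i) (a.drop j)
        simpa using this
      have hflen : ((s.drop i).take best).length = best := by
        simp; omega
      by_cases heq : s.getD i "" = a.getD j ""
      · have hcons_s : s.drop i = s[i]'hi :: s.drop (i + 1) := (List.getElem_cons_drop ..).symm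
        have hcons_a : a.drop j = a[j]'hj :: a.drop (j + 1) := (List.getElem_cons_drop ..).symm
        have heq' : s[i]'hi = a[j]'hj := by
          rwa [List.getD_eq_getElem s "" hi, List.getD_eq_getElem a "" hj] at heq
        have hpos : 1 ≤ lcpLen (s.drop i) (a.drop j) := by
          rw [hcons_s, hcons_a]; simp [lcpLen, heq']
        rw [pvInner, if_pos hj, if_pos heq, pvScan, if_pos hj, hlcp, hm]
        simp only [hflen]
        have hsub : i + lcpLen (s.drop i) (a.drop j) - i = lcpLen (s.drop i) (a.drop j) := by omega
        have hmax : max (lcpLen (s.drop i) (a.drop j)) 1 = lcpLen (s.drop i) (a.drop j) := by omega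
        have hslice : PySem.List.slice s (some (i : Int))
            (some ((i + lcpLen (s.drop i) (a.drop j) : Nat) : Int))
            = (s.drop i).take (lcpLen (s.drop i) (a.drop j)) := by
          rw [PySem.List.slice_natCast, Nat.add_sub_cancel_left]
        rw [hsub, hmax, hslice]
        by_cases hbm : best < lcpLen (s.drop i) (a.drop j)
        · rw [if_pos hbm, if_pos (by omega)]
          exact ih (j + lcpLen (s.drop i) (a.drop j)) (lcpLen (s.drop i) (a.drop j))
            (by omega) hL_le
        · rw [if_neg hbm, if_neg (by omega)]
          exact ih (j + lcpLen (s.drop i) (a.drop j)) best (by omega) hb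
      · have hzero : lcpLen (s.drop i) (a.drop j) = 0 := by
          have hcons_s : s.drop i = s[i]'hi :: s.drop (i + 1) := (List.getElem_cons_drop ..).symm
          have hcons_a : a.drop j = a[j]'hj :: a.drop (j + 1) := (List.getElem_cons_drop ..).symm
          have hne : s[i]'hi ≠ a[j]'hj := by
            intro hc
            apply heq
            rw [List.getD_eq_getElem s "" hi, List.getD_eq_getElem a "" hj]; exact hc
          rw [hcons_s, hcons_a]; simp [lcpLen, hne]
        rw [pvInner, if_pos hj, if_neg heq, pvScan, if_pos hj, hm, hzero]
        rw [if_neg (by omega)]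
        simpa using ih (j + 1) best (by omega) hb
    · rw [pvInner, if_neg hj, pvScan, if_neg hj]

theorem outer_eq (s a : List String) :
    ∀ (fuel i : Nat) (F : List (List String)),
    pvOuter s a fuel F i = pvOuterB s (rowsR a s) a.length fuel F i := by
  intro fuel
  induction fuel with
  | zero => intro i F; rfl
  | succ fuel ih =>
    intro i F
    by_cases hi : i < s.length
    · have hrow : ∀ j, ((rowsR a s).getD i []).getD j 0 ≤ s.length - i := by
        intro j
        rw [rowsR_getD]
        have := lcpLen_le_left (s.drop i) (a.drop j)
        simp at this; omega
      have hbest := pvScan_le ((rowsR a s).getD i []) a.length (s.length - i) hrow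
        (a.length + 1) 0 0 (by omega)
      have hf : pvInner s a i (a.length + 1) [] 0
          = (s.drop i).take (pvScan ((rowsR a s).getD i []) a.length (a.length + 1) 0 0) := by
        have h0 : ([] : List String) = (s.drop i).take 0 := by simp
        rw [h0]
        exact inner_eq s a i hi (a.length + 1) 0 0 (by omega) (by omega)
      have hflen : ((s.drop i).take (pvScan ((rowsR a s).getD i []) a.length (a.length + 1) 0 0)).length
          = pvScan ((rowsR a s).getD i []) a.length (a.length + 1) 0 0 := by
        rw [List.length_take, List.length_drop]; omega
      have hslice : PySem.List.slice s (some (i : Int))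
          (some ((i + pvScan ((rowsR a s).getD i []) a.length (a.length + 1) 0 0 : Nat) : Int))
          = (s.drop i).take (pvScan ((rowsR a s).getD i []) a.length (a.length + 1) 0 0) := by
        rw [PySem.List.slice_natCast, Nat.add_sub_cancel_left]
      rw [pvOuter, if_pos hi, pvOuterB, if_pos hi, hf, hflen, hslice]
      apply ih
    · rw [pvOuter, if_neg hi, pvOuterB, if_neg hi]

-- ===== VERDICT (by name: the statement is the Claim_ definition above) =====
theorem extractive_fragment_spec : Claim_equal_extractive_fragment := by
  intro article summary _
  unfold Spec_extractive_fragment extractive_fragment extractive_fragment_alt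
  rw [pvRows_eq_rowsR]
  exact outer_eq summary article (summary.length + 1) 0 []
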